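-- pv_equiv track=rewrite | github.com/joetache4/ProjectEuler | 105_SpecialSubsetSumsTesting.py | cond2
-- ===== SOURCE A (Python) =====
-- def cond2(arr):
-- 	arr.sort()
-- 	m = arr[0] # sum of lower terms
-- 	M = 0      # sum of higher terms
-- 	a = 1
-- 	b = len(arr)-1
-- 	while a < b:
-- 		m += arr[a]
-- 		M += arr[b]
-- 		if m <= M:
-- 			return False
-- 		a += 1
-- 		b -= 1
-- 	return True
-- ===== SOURCE B (Python) =====
-- def cond2(arr):
-- 	arr.sort()
-- 	n = len(arr)
-- 	P = [0]
-- 	s = 0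
-- 	for x in arr:
-- 		s += x
-- 		P.append(s)
-- 	for k in range(1, (n + 1) // 2):
-- 		if P[k + 1] <= P[n] - P[n - k]:
-- 			return False
-- 	return True
-- ===== Notes on version B (the rewrite author's own statement) =====
-- stated objective: alternative
-- what changed: Replaces the two-pointer loop with running low/high accumulators by a precomputed prefix-sum array P and a single indexed scan comparing P[k+1] with P[n]-P[n-k].
import Mathlib
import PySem

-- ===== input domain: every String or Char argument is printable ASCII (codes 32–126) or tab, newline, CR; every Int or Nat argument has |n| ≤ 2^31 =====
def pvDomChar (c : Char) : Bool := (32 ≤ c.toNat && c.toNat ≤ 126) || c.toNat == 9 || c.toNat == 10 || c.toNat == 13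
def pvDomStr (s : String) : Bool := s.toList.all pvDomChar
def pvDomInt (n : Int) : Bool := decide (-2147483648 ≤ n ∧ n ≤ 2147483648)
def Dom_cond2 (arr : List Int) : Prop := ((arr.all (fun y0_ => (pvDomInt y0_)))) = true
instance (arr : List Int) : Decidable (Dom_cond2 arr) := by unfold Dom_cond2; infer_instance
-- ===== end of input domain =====

-- B replaces A's two-pointer running-accumulator loop by a prefix-sum array and an
-- indexed scan (same cost; equivalence is about the return value — both sort arr in place).

-- ===== PORT A =====
-- the while-loop of A: state (m, M, a, b), early return False
def cond2Loop (s : List Int) (m M a b : Int) : Bool :=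
  if _h : a < b then
    match PySem.List.pyGet? s a, PySem.List.pyGet? s b with
    | some x, some y =>
        if m + x ≤ M + y then false
        else cond2Loop s (m + x) (M + y) (a + 1) (b - 1)
    | _, _ => false   -- IndexError (unreachable for the calls A makes)
  else true
termination_by (b - a).toNat
decreasing_by omega

def cond2 (arr : List Int) : Bool :=
  let s := PySem.List.sorted arr (fun x => x) false
  match PySem.List.pyGet? s 0 with
  | some m0 => cond2Loop s m0 0 1 ((s.length : Int) - 1)
  | none => false   -- IndexError on empty arr (excluded by Pre_cond2)

-- ===== PORT B =====
def cond2_alt (arr : List Int) : Bool :=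
  let s := PySem.List.sorted arr (fun x => x) false
  let n : Int := (s.length : Int)
  let P := (s.foldl (fun st x => (st.1 ++ [st.2 + x], st.2 + x)) ([(0 : Int)], (0 : Int))).1
  (PySem.List.pyRange 1 (PySem.Int.floordiv (n + 1) 2) 1).all
    (fun k => !decide (PySem.List.pyGetD P (k + 1) 0 ≤ PySem.List.pyGetD P n 0 - PySem.List.pyGetD P (n - k) 0))

-- ===== PRECONDITION & SPEC =====
-- Pre_ excludes only the empty list, on which A raises IndexError (arr[0]).
def Pre_cond2 (arr : List Int) : Prop := arr ≠ []
instance (arr : List Int) : Decidable (Pre_cond2 arr) := by unfold Pre_cond2; infer_instance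
def pvWitness_cond2 : List Int := [2, 3, 4]

def Spec_cond2 (arr : List Int) (out : Bool) : Prop := out = cond2_alt arr
instance (arr : List Int) (out : Bool) : Decidable (Spec_cond2 arr out) := by unfold Spec_cond2; infer_instance

-- ===== CLAIM (what is proved, stated in full; the proofs are below) =====
def Claim_equal_cond2 : Prop := ∀ (arr : List Int), Dom_cond2 arr → Pre_cond2 arr → Spec_cond2 arr (cond2 arr)

-- ===== LEMMAS AND PROOFS =====

-- sum of the first i elements of s
def psum (s : List Int) (i : Nat) : Int := (s.take i).sum

-- the common shape both sides reduce to
def chk (s : List Int) (a : Int) : Bool :=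
  (PySem.List.pyRange a (PySem.Int.floordiv ((s.length : Int) + 1) 2) 1).all
    (fun k => !decide (psum s (k + 1).toNat ≤ psum s s.length - psum s (((s.length : Int) - k).toNat)))

theorem all_congr_mem {α : Type} (l : List α) (f g : α → Bool)
    (h : ∀ x ∈ l, f x = g x) : l.all f = l.all g := by
  induction l with
  | nil => rfl
  | cons x t ih =>
      simp only [List.all_cons]
      rw [h x (List.mem_cons_self), ih (fun y hy => h y (List.mem_cons_of_mem _ hy))]

theorem foldP (l : List Int) (P0 : List Int) (s0 : Int) :
    l.foldl (fun st x => (st.1 ++ [st.2 + x], st.2 + x)) (P0, s0)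
      = (P0 ++ (List.range l.length).map (fun i => s0 + (l.take (i + 1)).sum), s0 + l.sum) := by
  induction l generalizing P0 s0 with
  | nil => simp
  | cons x t ih =>
      rw [List.foldl_cons, ih]
      simp [List.range_succ_eq_map, Function.comp_def, add_assoc, List.take_succ_cons]

theorem psum_succ (s : List Int) (i : Nat) (h : i < s.length) :
    psum s (i + 1) = psum s i + s[i] := by
  simp [psum, List.sum_take_succ s i h]

theorem P_get (s : List Int) (i : Int) (h0 : 0 ≤ i) (h1 : i ≤ (s.length : Int)) :
    PySem.List.pyGetD
      ((s.foldl (fun st x => (st.1 ++ [st.2 + x], st.2 + x)) ([(0 : Int)], (0 : Int))).1) i 0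
      = psum s i.toNat := by
  have hP : (s.foldl (fun st x => (st.1 ++ [st.2 + x], st.2 + x)) ([(0 : Int)], (0 : Int))).1
      = (List.range (s.length + 1)).map (psum s) := by
    rw [foldP]
    simp [List.range_succ_eq_map, Function.comp_def, psum]
  rw [hP, PySem.List.pyGetD_eq_getElem _ 0 h0 (by simp; omega)]
  simp

theorem loopA_eq (s : List Int) (t : Nat) : ∀ (a : Int), 1 ≤ a →
    (((s.length : Int) - 2 * a).toNat ≤ 2 * t) →
    cond2Loop s (psum s a.toNat) (psum s s.length - psum s (((s.length : Int) - a + 1).toNat))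
        a ((s.length : Int) - a)
      = chk s a := by
  induction t with
  | zero =>
      intro a ha hm
      have hab : ¬ (a < (s.length : Int) - a) := by omega
      rw [cond2Loop, dif_neg hab, chk,
        PySem.List.pyRange_one_eq_nil (by
          have := PySem.Int.le_floordiv_iff_mul_le (a := (s.length : Int) + 1) (q := a + 1)
            (by omega : (0:Int) < 2)
          omega)]
      rfl
  | succ t ih =>
      intro a ha hm
      by_cases hab : a < (s.length : Int) - a
      · have hga := PySem.List.pyGet?_eq_some_getElem s (i := a) (by omega) (by omega)
        have hgb := PySem.List.pyGet?_eq_some_getElem s (i := (s.length : Int) - a) (by omega) (by omega)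
        have hm1 : psum s a.toNat + s[a.toNat]'(by omega) = psum s (a + 1).toNat := by
          rw [show (a + 1).toNat = a.toNat + 1 by omega, psum_succ s a.toNat (by omega)]
        have hM1 : psum s s.length - psum s (((s.length : Int) - a + 1).toNat)
              + s[((s.length : Int) - a).toNat]'(by omega)
            = psum s s.length - psum s (((s.length : Int) - a).toNat) := by
          rw [show (((s.length : Int) - a + 1).toNat) = ((s.length : Int) - a).toNat + 1 by omega,
            psum_succ s (((s.length : Int) - a).toNat) (by omega)]
          ring
        have hcons : PySem.List.pyRange a (PySem.Int.floordiv ((s.length : Int) + 1) 2) 1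
            = a :: PySem.List.pyRange (a + 1) (PySem.Int.floordiv ((s.length : Int) + 1) 2) 1 := by
          refine PySem.List.pyRange_one_cons ?_
          have := PySem.Int.le_floordiv_iff_mul_le (a := (s.length : Int) + 1) (q := a + 1)
            (by omega : (0:Int) < 2)
          omega
        rw [cond2Loop, dif_pos hab, hga, hgb]
        simp only [hm1, hM1]
        by_cases hc : psum s (a + 1).toNat ≤ psum s s.length - psum s (((s.length : Int) - a).toNat)
        · rw [if_pos hc, chk, hcons, List.all_cons]
          simp [hc]
        · rw [if_neg hc]
          have hrec : cond2Loop s (psum s (a + 1).toNat)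
              (psum s s.length - psum s (((s.length : Int) - (a + 1) + 1).toNat))
              (a + 1) ((s.length : Int) - (a + 1)) = chk s (a + 1) :=
            ih (a + 1) (by omega) (by omega)
          rw [show ((s.length : Int) - a - 1) = (s.length : Int) - (a + 1) by ring,
            show (((s.length : Int) - a).toNat) = (((s.length : Int) - (a + 1) + 1).toNat) by omega,
            hrec, chk, chk, hcons, List.all_cons]
          simp [hc]
      · rw [cond2Loop, dif_neg hab, chk,
          PySem.List.pyRange_one_eq_nil (by
            have := PySem.Int.le_floordiv_iff_mul_le (a := (s.length : Int) + 1) (q := a + 1)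
              (by omega : (0:Int) < 2)
            omega)]
        rfl

-- ===== VERDICT (by name: the statement is the Claim_ definition above) =====
theorem cond2_spec : Claim_equal_cond2 := by
  unfold Claim_equal_cond2
  intro arr _hdom hpre
  unfold Spec_cond2 cond2 cond2_alt
  set s := PySem.List.sorted arr (fun x => x) false with hs
  have hsne : s ≠ [] := by
    intro h
    have := PySem.List.sorted_perm arr (fun x => x) false
    rw [← hs, h] at this
    exact hpre (this.nil_eq).symm
  have hlen : 0 < s.length := List.length_pos_iff.mpr hsne
  have hget := PySem.List.pyGet?_eq_some_getElem s (i := 0) (by omega) (by omega)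
  have hm0 : s[(0 : Int).toNat]'(by omega) = psum s (1 : Int).toNat := by
    rw [show (1 : Int).toNat = 0 + 1 from rfl, psum_succ s 0 hlen]
    simp [psum]
  have hget2 : PySem.List.pyGet? s 0 = some (psum s (1 : Int).toNat) :=
    hget.trans (congrArg some hm0)
  simp only [hget2]
  have hM0 : psum s s.length - psum s (((s.length : Int) - 1 + 1).toNat) = 0 := by
    simp [psum]
  have hloop := loopA_eq s s.length 1 (by omega) (by omega)
  rw [hM0] at hloop
  rw [hloop]
  unfold chk
  refine all_congr_mem _ _ _ ?_
  intro k hk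
  rw [PySem.List.mem_pyRange_one] at hk
  have h2k : (k + 1) * 2 ≤ (s.length : Int) + 1 :=
    (PySem.Int.le_floordiv_iff_mul_le (by omega : (0:Int) < 2)).mp (by omega)
  rw [P_get s (k + 1) (by omega) (by omega),
    P_get s ((s.length : Int)) (by omega) (by omega),
    P_get s ((s.length : Int) - k) (by omega) (by omega)]
  simp
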